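-- pv_equiv track=rewrite | github.com/komap2017/soc | soc.py | get_el_until_last
-- ===== SOURCE A (Python) =====
-- def get_el_until_last(array, element):
--     new_list = []
--     i = 0
--     while i != len(array):
--         if str(element) not in str(array[i]):
--             new_list.append(array[i])
--         else:
--             new_list.append(array[i])
--             break
--         i += 1
--     return new_list
-- ===== SOURCE B (Python) =====
-- def get_el_until_last(array, element):
--     idx = next((i for i, x in enumerate(array) if str(element) in str(x)), None)
--     return list(array) if idx is None else list(array[:idx + 1])
-- ===== Notes on version B (the rewrite author's own statement) =====
-- stated objective: alternative
-- what changed: B first locates the index of the first matching element in one scan and then copies the inclusive prefix by slicing, instead of appending elements one at a time inside a while loop with a break.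
import Mathlib
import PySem

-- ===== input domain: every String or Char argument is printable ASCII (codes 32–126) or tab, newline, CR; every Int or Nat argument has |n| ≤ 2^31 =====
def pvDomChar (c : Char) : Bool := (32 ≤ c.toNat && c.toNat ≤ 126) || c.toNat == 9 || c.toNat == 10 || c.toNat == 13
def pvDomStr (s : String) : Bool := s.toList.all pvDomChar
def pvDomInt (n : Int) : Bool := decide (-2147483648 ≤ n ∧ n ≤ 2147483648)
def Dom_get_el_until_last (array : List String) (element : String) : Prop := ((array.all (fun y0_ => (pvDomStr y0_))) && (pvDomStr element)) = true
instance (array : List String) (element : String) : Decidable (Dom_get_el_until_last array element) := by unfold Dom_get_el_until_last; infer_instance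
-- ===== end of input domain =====

-- B locates the first matching index in one scan then slices the inclusive prefix (alternative decomposition; same behaviour).
-- ===== PORT A =====
-- while loop over indices, appending each element; breaks after appending the first match.
def get_el_until_last_loopA (array : List String) (element : String) : List String :=
  match array with
  | [] => []
  | x :: xs =>
    if (PySem.Str.isIn element x) = false then
      x :: get_el_until_last_loopA xs element
    else
      [x]

def get_el_until_last (array : List String) (element : String) : List String :=
  get_el_until_last_loopA array element

-- ===== PORT B =====
def get_el_until_last_alt (array : List String) (element : String) : List String :=
  match array.findIdx? (fun x => PySem.Str.isIn element x) with
  | none => array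
  | some i => array.take (i + 1)

-- ===== PRECONDITION & SPEC =====
def Spec_get_el_until_last (array : List String) (element : String) (out : List String) : Prop := out = get_el_until_last_alt array element
instance (array : List String) (element : String) (out : List String) : Decidable (Spec_get_el_until_last array element out) := by unfold Spec_get_el_until_last; infer_instance

-- ===== CLAIM (what is proved, stated in full; the proofs are below) =====
def Claim_equal_get_el_until_last : Prop := ∀ (array : List String) (element : String), Dom_get_el_until_last array element → Spec_get_el_until_last array element (get_el_until_last array element)

-- ===== LEMMAS AND PROOFS =====
theorem loopA_eq_alt (array : List String) (element : String) :
    get_el_until_last_loopA array element = get_el_until_last_alt array element := by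
  induction array with
  | nil => rfl
  | cons x xs ih =>
    by_cases h : PySem.Chars.isIn element.toList x.toList = true
    · simp [get_el_until_last_loopA, get_el_until_last_alt, List.findIdx?_cons, h]
    · rw [Bool.not_eq_true] at h
      simp only [get_el_until_last_loopA, get_el_until_last_alt, List.findIdx?_cons,
        PySem.Str.isIn_eq, h, ih]
      cases hf : xs.findIdx? (fun x => PySem.Chars.isIn element.toList x.toList) with
      | none => simp [get_el_until_last_alt, hf]
      | some i => simp [get_el_until_last_alt, hf, List.take_succ_cons]

-- ===== VERDICT (by name: the statement is the Claim_ definition above) =====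
theorem get_el_until_last_spec : Claim_equal_get_el_until_last := by
  intro array element _
  unfold Spec_get_el_until_last get_el_until_last
  exact loopA_eq_alt array element
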